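-- pv_equiv track=rewrite | github.com/ksayee/programming_assignments | python/CodingExercises/AlternatingCharactersTwoHalvesStringReverse.py | AlternatingCharactersTwoHalvesStringReverse
-- ===== SOURCE A (Python) =====
-- def AlternatingCharactersTwoHalvesStringReverse(word):
--
--     half_idx=len(word)//2
--
--     half1=list(word[:half_idx])
--     half2=list(word[half_idx:])
--     output_list=[]
--
--     flg=True
--     while len(half1)!=0 or len(half2)!=0:
--         if flg==True:
--             if len(half1)>0:
--                 output_list.append(half1[-1])
--                 half1.pop()
--             flg=False
--         else:
--             if len(half2)>0:
--                 output_list.append(half2[-1])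
--                 half2.pop()
--             flg=True
--     return ''.join(output_list)
-- ===== SOURCE B (Python) =====
-- def AlternatingCharactersTwoHalvesStringReverse(word):
--     half = len(word) // 2
--     r1 = word[:half][::-1]
--     r2 = word[half:][::-1]
--     out = []
--     for a, b in zip(r1, r2):
--         out.append(a)
--         out.append(b)
--     out.extend(r2[len(r1):])
--     return ''.join(out)
-- ===== Notes on version B (the rewrite author's own statement) =====
-- stated objective: simpler
-- what changed: Replaced the stateful toggle loop over two pop-from-the-end stacks with pre-reversed slices and a single zip pass plus the leftover tail of the longer half.
import Mathlib
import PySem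

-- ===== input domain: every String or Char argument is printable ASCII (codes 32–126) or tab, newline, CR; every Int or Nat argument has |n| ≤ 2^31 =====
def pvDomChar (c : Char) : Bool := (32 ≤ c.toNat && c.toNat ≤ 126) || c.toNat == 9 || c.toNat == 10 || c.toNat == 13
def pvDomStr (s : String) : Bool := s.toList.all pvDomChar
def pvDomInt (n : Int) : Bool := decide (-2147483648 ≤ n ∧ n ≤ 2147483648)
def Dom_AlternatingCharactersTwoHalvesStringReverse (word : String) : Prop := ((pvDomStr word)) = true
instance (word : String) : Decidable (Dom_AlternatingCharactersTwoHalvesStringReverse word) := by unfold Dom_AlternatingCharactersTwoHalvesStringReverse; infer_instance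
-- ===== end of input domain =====

-- B replaces A's toggle-flag loop over two pop-from-the-end stacks by a single zip pass over
-- pre-reversed halves plus the leftover tail (objective: simpler).

-- ===== PORT A =====
-- the while loop of A: state is (half1, half2, output_list, flg); half[-1]/pop ported as
-- getLast!/dropLast (exact: the branch guard ensures the list is nonempty there)
def pvLoopA (h1 h2 out : List Char) (flg : Bool) : List Char :=
  if h1.length ≠ 0 ∨ h2.length ≠ 0 then
    if flg = true then
      if h1.length > 0 then pvLoopA h1.dropLast h2 (out ++ [h1.getLast!]) false
      else pvLoopA h1 h2 out false
    else
      if h2.length > 0 then pvLoopA h1 h2.dropLast (out ++ [h2.getLast!]) true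
      else pvLoopA h1 h2 out true
  else out
termination_by 2 * (h1.length + h2.length) + (if flg then 1 else if h2.length = 0 then 2 else 0)
decreasing_by all_goals simp_all [List.length_dropLast] <;> split_ifs <;> simp_all <;> omega

-- word[:half] / word[half:] ported by hand as take/drop on the char list (exact: half = len//2 is
-- a nonnegative in-range index); ''.join ported as String.ofList
def AlternatingCharactersTwoHalvesStringReverse (word : String) : String :=
  let halfIdx := word.toList.length / 2
  let half1 := word.toList.take halfIdx
  let half2 := word.toList.drop halfIdx
  String.ofList (pvLoopA half1 half2 [] true)

-- ===== PORT B =====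
def AlternatingCharactersTwoHalvesStringReverse_alt (word : String) : String :=
  let half := word.toList.length / 2
  let r1 := (word.toList.take half).reverse
  let r2 := (word.toList.drop half).reverse
  let out := (r1.zip r2).foldl (fun acc p => acc ++ [p.1, p.2]) []
  String.ofList (out ++ r2.drop r1.length)

-- ===== PRECONDITION & SPEC =====
def Spec_AlternatingCharactersTwoHalvesStringReverse (word : String) (out : String) : Prop := out = AlternatingCharactersTwoHalvesStringReverse_alt word
instance (word : String) (out : String) : Decidable (Spec_AlternatingCharactersTwoHalvesStringReverse word out) := by unfold Spec_AlternatingCharactersTwoHalvesStringReverse; infer_instance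

-- ===== CLAIM (what is proved, stated in full; the proofs are below) =====
def Claim_equal_AlternatingCharactersTwoHalvesStringReverse : Prop := ∀ (word : String), Dom_AlternatingCharactersTwoHalvesStringReverse word → Spec_AlternatingCharactersTwoHalvesStringReverse word (AlternatingCharactersTwoHalvesStringReverse word)

-- ===== LEMMAS AND PROOFS =====

theorem pvFoldl_pairs (l : List (Char × Char)) (init : List Char) :
    l.foldl (fun acc p => acc ++ [p.1, p.2]) init = init ++ l.flatMap (fun p => [p.1, p.2]) := by
  induction l generalizing init with
  | nil => simp
  | cons p t ih => simp [List.foldl_cons, ih, List.append_assoc]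

-- A's loop, parameterised by the halves written as reverses: it produces the zip-interleaving
-- followed by the leftover of the longer (second) half.
theorem pvLoopA_spec (r1 r2 : List Char) (out : List Char) (h : r1.length ≤ r2.length) :
    pvLoopA r1.reverse r2.reverse out true =
      out ++ (r1.zip r2).flatMap (fun p => [p.1, p.2]) ++ r2.drop r1.length := by
  induction r1 generalizing r2 out with
  | nil =>
    induction r2 generalizing out with
    | nil => simp [pvLoopA]
    | cons b t ihb =>
      have hdl : (t.reverse ++ [b]).dropLast = t.reverse := by simp
      have hgl : (t.reverse ++ [b]).getLast! = b := by simp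
      rw [pvLoopA]
      norm_num
      rw [pvLoopA]
      norm_num [hdl, hgl]
      have := ihb (out ++ [b]) (by simp)
      simp only [List.reverse_nil, List.length_nil, List.drop_zero] at this ⊢
      rw [this]
      simp
  | cons a t1 ih =>
    cases r2 with
    | nil => simp at h
    | cons b t2 =>
      have hdl1 : (a :: t1).reverse.dropLast = t1.reverse := by simp
      have hgl1 : (a :: t1).reverse.getLast! = a := by simp
      have hdl2 : (b :: t2).reverse.dropLast = t2.reverse := by simp
      have hgl2 : (b :: t2).reverse.getLast! = b := by simp
      rw [pvLoopA]
      norm_num [hdl1, hgl1]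
      rw [pvLoopA]
      norm_num [hdl2, hgl2]
      have hle : t1.length ≤ t2.length := by simpa using h
      rw [ih t2 (out ++ [a, b]) hle]
      simp

-- ===== VERDICT (by name: the statement is the Claim_ definition above) =====
theorem AlternatingCharactersTwoHalvesStringReverse_spec : Claim_equal_AlternatingCharactersTwoHalvesStringReverse := by
  intro word _
  unfold Spec_AlternatingCharactersTwoHalvesStringReverse
  unfold AlternatingCharactersTwoHalvesStringReverse AlternatingCharactersTwoHalvesStringReverse_alt
  simp only []
  set l := word.toList with hl
  set h := l.length / 2 with hh
  have hle : ((l.take h).reverse).length ≤ ((l.drop h).reverse).length := by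
    simp [List.length_take, List.length_drop]; omega
  have key := pvLoopA_spec ((l.take h).reverse) ((l.drop h).reverse) [] hle
  simp only [List.reverse_reverse] at key
  rw [key, pvFoldl_pairs]
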